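-- pv_equiv track=rewrite | github.com/SahilPatki30082002/Infytq-onwingspan-Practice-Problems | Programming Fundamentals using Python - Part 2/Solved Practice/l1/p20l1.py | sum_of_elements
-- ===== SOURCE A (Python) =====
-- def sum_of_elements(num_list,number):
--     result_sum = 0
--     occ = [i for i,num in enumerate(num_list) if num==number]
--     ignore = set()
--     all = set(range(len(num_list)))
--     for i in range(len(occ)):
--         j1 = occ[i]-1
--         j2 = occ[i]+1
--         if occ[i] == 0:
--             j1 = 0
--         if occ[i] == len(num_list)-1:
--             j2 = len(num_list)-1
--         ignore.add(j1)
--         ignore.add(occ[i])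
--         ignore.add(j2)
--     accept = all - ignore
--     for i in accept:
--         result_sum+=num_list[i]
--     return result_sum
-- ===== SOURCE B (Python) =====
-- def sum_of_elements(num_list, number):
--     n = len(num_list)
--     total = 0
--     for i in range(n):
--         if num_list[i] == number:
--             continue
--         if i > 0 and num_list[i - 1] == number:
--             continue
--         if i + 1 < n and num_list[i + 1] == number:
--             continue
--         total += num_list[i]
--     return total
-- ===== Notes on version B (the rewrite author's own statement) =====
-- stated objective: simpler
-- what changed: Replaces A's occurrence list, ignore set, universe set and set difference with a single pass over indices that skips an element when it or an adjacent element equals the target.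
import Mathlib
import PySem

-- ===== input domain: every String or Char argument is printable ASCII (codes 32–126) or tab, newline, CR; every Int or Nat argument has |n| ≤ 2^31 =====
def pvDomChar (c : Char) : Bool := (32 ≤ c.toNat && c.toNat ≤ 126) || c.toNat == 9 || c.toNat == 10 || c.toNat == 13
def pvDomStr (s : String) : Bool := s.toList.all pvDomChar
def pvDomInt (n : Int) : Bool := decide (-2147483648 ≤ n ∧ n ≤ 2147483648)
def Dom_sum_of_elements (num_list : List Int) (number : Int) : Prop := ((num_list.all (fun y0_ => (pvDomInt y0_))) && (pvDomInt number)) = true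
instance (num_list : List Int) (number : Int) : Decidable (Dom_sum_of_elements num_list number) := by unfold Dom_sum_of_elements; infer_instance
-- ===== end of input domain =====

-- B replaces A's occurrence list / ignore set / universe set / set difference with a single
-- index loop doing a local neighbour check (simpler; return value identical, A is total).

-- ===== PORT A =====
def sum_of_elements (num_list : List Int) (number : Int) : Int :=
  -- occ = [i for i,num in enumerate(num_list) if num==number]
  let occ : List Int :=
    ((PySem.List.enumerate num_list 0).filter (fun p => p.2 == number)).map (fun p => p.1)
  -- for i in range(len(occ)): … ignore.add(j1); ignore.add(occ[i]); ignore.add(j2)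
  let ignore : PySem.Set Int :=
    (PySem.List.pyRange 0 (occ.length : Int) 1).foldl (fun ig i =>
      let o := PySem.List.pyGetD occ i 0   -- occ[i]; i is in range, so the default is never used
      let j1 := o - 1
      let j2 := o + 1
      let j1 := if o == 0 then (0 : Int) else j1
      let j2 := if o == (num_list.length : Int) - 1 then (num_list.length : Int) - 1 else j2
      PySem.Set.add (PySem.Set.add (PySem.Set.add ig j1) o) j2) PySem.Set.empty
  let all : PySem.Set Int := PySem.Set.ofList (PySem.List.pyRange 0 (num_list.length : Int) 1)
  let accept := PySem.Set.diff all ignore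
  -- for i in accept: result_sum += num_list[i]   (a sum over a set: order-independent)
  accept.foldl (fun s i => s + PySem.List.pyGetD num_list i 0) 0

-- ===== PORT B =====
def sum_of_elements_alt (num_list : List Int) (number : Int) : Int :=
  let n : Int := num_list.length
  (PySem.List.pyRange 0 n 1).foldl (fun total i =>
    if PySem.List.pyGetD num_list i 0 == number then total
    else if decide (0 < i) && (PySem.List.pyGetD num_list (i - 1) 0 == number) then total
    else if decide (i + 1 < n) && (PySem.List.pyGetD num_list (i + 1) 0 == number) then total
    else total + PySem.List.pyGetD num_list i 0) 0

-- ===== PRECONDITION & SPEC =====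
def Spec_sum_of_elements (num_list : List Int) (number : Int) (out : Int) : Prop := out = sum_of_elements_alt num_list number
instance (num_list : List Int) (number : Int) (out : Int) : Decidable (Spec_sum_of_elements num_list number out) := by unfold Spec_sum_of_elements; infer_instance

-- ===== CLAIM (what is proved, stated in full; the proofs are below) =====
def Claim_equal_sum_of_elements : Prop := ∀ (num_list : List Int) (number : Int), Dom_sum_of_elements num_list number → Spec_sum_of_elements num_list number (sum_of_elements num_list number)

-- ===== LEMMAS AND PROOFS =====

theorem sum_map_filter (l : List Int) (p : Int → Bool) (f : Int → Int) :
    ((l.filter p).map f).sum = (l.map (fun x => if p x then f x else 0)).sum := by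
  induction l with
  | nil => simp
  | cons x xs ih => by_cases h : p x <;> simp [h, ih]

theorem mem_fold3add (l : List Int) (d1 d2 : Int → Int) (s : PySem.Set Int) (y : Int) :
    (y ∈ l.foldl (fun ig o => PySem.Set.add (PySem.Set.add (PySem.Set.add ig (d1 o)) o) (d2 o)) s) ↔
      y ∈ s ∨ ∃ o ∈ l, y = d1 o ∨ y = o ∨ y = d2 o := by
  induction l generalizing s with
  | nil => simp
  | cons x xs ih =>
    simp only [List.foldl_cons, ih, PySem.Set.mem_add, List.mem_cons]
    constructor
    · rintro ((((h|h)|h)|h)|⟨o,ho,h⟩)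
      · exact Or.inl h
      · exact Or.inr ⟨x, Or.inl rfl, Or.inl h⟩
      · exact Or.inr ⟨x, Or.inl rfl, Or.inr (Or.inl h)⟩
      · exact Or.inr ⟨x, Or.inl rfl, Or.inr (Or.inr h)⟩
      · exact Or.inr ⟨o, Or.inr ho, h⟩
    · rintro (h | ⟨o, ho|ho, h⟩)
      · exact Or.inl (Or.inl (Or.inl (Or.inl h)))
      · subst ho
        rcases h with h|h|h
        · exact Or.inl (Or.inl (Or.inl (Or.inr h)))
        · exact Or.inl (Or.inl (Or.inr h))
        · exact Or.inl (Or.inr h)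
      · exact Or.inr ⟨o, ho, h⟩

theorem mem_occ (xs : List Int) (v : Int) (j : Int) :
    j ∈ ((PySem.List.enumerate xs 0).filter (fun p => p.2 == v)).map (fun p => p.1) ↔
      (0 ≤ j ∧ j < (xs.length : Int) ∧ PySem.List.pyGetD xs j 0 = v) := by
  simp only [List.mem_map, List.mem_filter, PySem.List.mem_enumerate_iff]
  constructor
  · rintro ⟨p, ⟨⟨k, hk, rfl⟩, hv⟩, rfl⟩
    simp only [beq_iff_eq] at hv
    refine ⟨by simp, by simpa using hk, ?_⟩
    rw [PySem.List.pyGetD_eq_getElem xs 0 (by simp) (by simpa using hk)]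
    simp [hv]
  · rintro ⟨h0, hn, hv⟩
    rw [PySem.List.pyGetD_eq_getElem xs 0 h0 hn] at hv
    exact ⟨((0:Int) + j.toNat, xs[j.toNat]), ⟨⟨j.toNat, by omega, rfl⟩, by simp [hv]⟩,
      by simp [Int.toNat_of_nonneg h0]⟩

-- membership in A's ignore set, for an index inside [0, n)
theorem mem_ignore (xs : List Int) (v y : Int) (h0 : 0 ≤ y) (hn : y < (xs.length : Int)) :
    (y ∈ (((PySem.List.enumerate xs 0).filter (fun p => p.2 == v)).map (fun p => p.1)).foldl
        (fun ig o => PySem.Set.add (PySem.Set.add (PySem.Set.add ig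
            (if o == 0 then (0 : Int) else o - 1)) o)
            (if o == (xs.length : Int) - 1 then (xs.length : Int) - 1 else o + 1))
        PySem.Set.empty) ↔
      ((0 ≤ y ∧ y < (xs.length : Int) ∧ PySem.List.pyGetD xs y 0 = v) ∨
       (0 ≤ y - 1 ∧ y - 1 < (xs.length : Int) ∧ PySem.List.pyGetD xs (y - 1) 0 = v) ∨
       (0 ≤ y + 1 ∧ y + 1 < (xs.length : Int) ∧ PySem.List.pyGetD xs (y + 1) 0 = v)) := by
  rw [mem_fold3add]
  simp only [PySem.Set.empty, List.not_mem_nil, false_or, mem_occ, beq_iff_eq]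
  constructor
  · rintro ⟨o, ⟨ho0, hon, hov⟩, hy | rfl | hy⟩
    · by_cases hz : o = 0
      · subst hz; simp at hy; subst hy; exact Or.inl ⟨h0, hn, hov⟩
      · simp [hz] at hy
        have hyo : y + 1 = o := by omega
        exact Or.inr (Or.inr ⟨by omega, by omega, by rw [hyo]; exact hov⟩)
    · exact Or.inl ⟨ho0, hon, hov⟩
    · by_cases hz : o = (xs.length : Int) - 1
      · simp [hz] at hy; subst hy; exact Or.inl ⟨h0, hn, hz ▸ hov⟩
      · simp [hz] at hy
        have hyo : y - 1 = o := by omega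
        exact Or.inr (Or.inl ⟨by omega, by omega, by rw [hyo]; exact hov⟩)
  · rintro (⟨_, _, hv⟩ | ⟨h1, h2, hv⟩ | ⟨h1, h2, hv⟩)
    · exact ⟨y, ⟨h0, hn, hv⟩, Or.inr (Or.inl rfl)⟩
    · refine ⟨y - 1, ⟨h1, h2, hv⟩, Or.inr (Or.inr ?_)⟩
      have hne : ¬ (y - 1 = (xs.length : Int) - 1) := by omega
      simp [hne]
    · refine ⟨y + 1, ⟨h1, h2, hv⟩, Or.inl ?_⟩
      have hne : ¬ (y + 1 = 0) := by omega
      simp [hne]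

-- ===== VERDICT (by name: the statement is the Claim_ definition above) =====
theorem sum_of_elements_spec : Claim_equal_sum_of_elements := by
  intro xs v _
  show sum_of_elements xs v = sum_of_elements_alt xs v
  -- abbreviations
  have hA : sum_of_elements xs v =
      (PySem.Set.diff (PySem.Set.ofList (PySem.List.pyRange 0 (xs.length : Int) 1))
        ((PySem.List.pyRange 0 (((((PySem.List.enumerate xs 0).filter (fun p => p.2 == v)).map (fun p => p.1)).length : Nat) : Int) 1).foldl
          (fun ig i =>
            PySem.Set.add (PySem.Set.add (PySem.Set.add ig
              (if PySem.List.pyGetD (((PySem.List.enumerate xs 0).filter (fun p => p.2 == v)).map (fun p => p.1)) i 0 == 0 then (0 : Int)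
               else PySem.List.pyGetD (((PySem.List.enumerate xs 0).filter (fun p => p.2 == v)).map (fun p => p.1)) i 0 - 1))
              (PySem.List.pyGetD (((PySem.List.enumerate xs 0).filter (fun p => p.2 == v)).map (fun p => p.1)) i 0))
              (if PySem.List.pyGetD (((PySem.List.enumerate xs 0).filter (fun p => p.2 == v)).map (fun p => p.1)) i 0 == (xs.length : Int) - 1 then (xs.length : Int) - 1
               else PySem.List.pyGetD (((PySem.List.enumerate xs 0).filter (fun p => p.2 == v)).map (fun p => p.1)) i 0 + 1))
          PySem.Set.empty)).foldl
        (fun s i => s + PySem.List.pyGetD xs i 0) 0 := rfl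
  have hB : sum_of_elements_alt xs v =
      (PySem.List.pyRange 0 (xs.length : Int) 1).foldl (fun total i =>
        if PySem.List.pyGetD xs i 0 == v then total
        else if decide (0 < i) && (PySem.List.pyGetD xs (i - 1) 0 == v) then total
        else if decide (i + 1 < (xs.length : Int)) && (PySem.List.pyGetD xs (i + 1) 0 == v) then total
        else total + PySem.List.pyGetD xs i 0) 0 := rfl
  rw [hA, hB]
  set occL : List Int := ((PySem.List.enumerate xs 0).filter (fun p => p.2 == v)).map (fun p => p.1) with hoccL
  -- A's loop over range(len(occ)) indexing occ is a fold over occ itself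
  have hfold :
      (PySem.List.pyRange 0 ((occL.length : Nat) : Int) 1).foldl
        (fun ig i =>
          PySem.Set.add (PySem.Set.add (PySem.Set.add ig
            (if PySem.List.pyGetD occL i 0 == 0 then (0 : Int) else PySem.List.pyGetD occL i 0 - 1))
            (PySem.List.pyGetD occL i 0))
            (if PySem.List.pyGetD occL i 0 == (xs.length : Int) - 1 then (xs.length : Int) - 1
             else PySem.List.pyGetD occL i 0 + 1))
        PySem.Set.empty =
      occL.foldl
        (fun ig o =>
          PySem.Set.add (PySem.Set.add (PySem.Set.add ig
            (if o == 0 then (0 : Int) else o - 1)) o)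
            (if o == (xs.length : Int) - 1 then (xs.length : Int) - 1 else o + 1))
        PySem.Set.empty := by
    conv_rhs => rw [← PySem.List.map_pyGetD_pyRange_zero occL 0]
    rw [List.foldl_map]
    rfl
  rw [hfold]
  set IG : PySem.Set Int :=
    occL.foldl
      (fun ig o =>
        PySem.Set.add (PySem.Set.add (PySem.Set.add ig
          (if o == 0 then (0 : Int) else o - 1)) o)
          (if o == (xs.length : Int) - 1 then (xs.length : Int) - 1 else o + 1))
      PySem.Set.empty with hIG
  rw [PySem.Set.ofList_eq_self_of_nodup _ (PySem.List.nodup_pyRange_one 0 _)]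
  have hdiff : PySem.Set.diff (PySem.List.pyRange 0 (xs.length : Int) 1) IG =
      (PySem.List.pyRange 0 (xs.length : Int) 1).filter (fun x => !(PySem.Set.contains IG x)) := rfl
  rw [hdiff, PySem.List.foldl_add, sum_map_filter]
  -- B's loop body, additively
  have hbody : ∀ (b1 b2 b3 : Bool) (t g : Int),
      (if b1 then t else if b2 then t else if b3 then t else t + g) =
        t + (if b1 || b2 || b3 then 0 else g) := by
    intro b1 b2 b3 t g; cases b1 <;> cases b2 <;> cases b3 <;> simp
  rw [PySem.List.foldl_congr_mem' _ _
      (fun total i => total +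
        (if (PySem.List.pyGetD xs i 0 == v)
            || (decide (0 < i) && (PySem.List.pyGetD xs (i - 1) 0 == v))
            || (decide (i + 1 < (xs.length : Int)) && (PySem.List.pyGetD xs (i + 1) 0 == v))
         then 0 else PySem.List.pyGetD xs i 0)) 0
      (fun i _ acc => hbody _ _ _ _ _),
    PySem.List.foldl_add]
  -- the two summands agree pointwise on [0, n)
  congr 1
  refine congrArg List.sum (List.map_congr_left ?_)
  intro i hi
  obtain ⟨h0, hn⟩ := PySem.List.mem_pyRange_one.mp hi
  have hig : i ∈ IG ↔
        ((0 ≤ i ∧ i < (xs.length : Int) ∧ PySem.List.pyGetD xs i 0 = v) ∨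
         (0 ≤ i - 1 ∧ i - 1 < (xs.length : Int) ∧ PySem.List.pyGetD xs (i - 1) 0 = v) ∨
         (0 ≤ i + 1 ∧ i + 1 < (xs.length : Int) ∧ PySem.List.pyGetD xs (i + 1) 0 = v)) :=
    mem_ignore xs v i h0 hn
  by_cases hmem : i ∈ IG
  · rcases hig.mp hmem with h | h | h
    · simp [hmem, h.2.2]
    · have h0i : (0 : Int) < i := by omega
      simp [hmem, h.2.2, h0i]
    · simp [hmem, h.2.2, h.2.1]
  · have h1 : PySem.Set.contains IG i = false := by
      rw [← Bool.not_eq_true]; simp only [PySem.Set.contains_iff]; exact hmem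
    have hnd := fun h => hmem (hig.mpr h)
    have c1 : ¬ (PySem.List.pyGetD xs i 0 = v) := fun h => hnd (Or.inl ⟨h0, hn, h⟩)
    have b2 : (decide (0 < i) && (PySem.List.pyGetD xs (i - 1) 0 == v)) = false := by
      by_cases h0i : (0 : Int) < i
      · simp only [h0i, decide_true, Bool.true_and, beq_eq_false_iff_ne, ne_eq]
        exact fun h => hnd (Or.inr (Or.inl ⟨by omega, by omega, h⟩))
      · simp [h0i]
    have b3 : (decide (i + 1 < (xs.length : Int)) && (PySem.List.pyGetD xs (i + 1) 0 == v)) = false := by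
      by_cases hni : i + 1 < (xs.length : Int)
      · simp only [hni, decide_true, Bool.true_and, beq_eq_false_iff_ne, ne_eq]
        exact fun h => hnd (Or.inr (Or.inr ⟨by omega, hni, h⟩))
      · simp [hni]
    simp [hmem, c1, b2, b3]
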